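-- pv_equiv track=rewrite | github.com/WildMonkey-PSI/dash | app.py | set_selectors
-- ===== SOURCE A (Python) =====
-- def set_selectors(data_csv):
--     countries_all = []
--     for x in data_csv['Country/Region']:
--         countries_all.append(x)
--     countries_all = list(dict.fromkeys(countries_all))
--     countries = []
--     for x in countries_all:
--         countries.append({'label': x, 'value': x})
--     return countries
-- ===== SOURCE B (Python) =====
-- def set_selectors(data_csv):
--     def uniq(rows):
--         if not rows:
--             return []
--         head = rows[0]
--         return [head] + uniq([x for x in rows[1:] if x != head])
--     return [{'label': x, 'value': x} for x in uniq(data_csv['Country/Region'])]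
-- ===== Notes on version B (the rewrite author's own statement) =====
-- stated objective: alternative
-- what changed: Replaced A's hash-based dedup (dict.fromkeys) plus two extra passes by a recursive filter-out dedup (take the head, filter all later equal elements from the tail, recurse) feeding one comprehension; it needs no hashing, only equality.
import Mathlib
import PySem

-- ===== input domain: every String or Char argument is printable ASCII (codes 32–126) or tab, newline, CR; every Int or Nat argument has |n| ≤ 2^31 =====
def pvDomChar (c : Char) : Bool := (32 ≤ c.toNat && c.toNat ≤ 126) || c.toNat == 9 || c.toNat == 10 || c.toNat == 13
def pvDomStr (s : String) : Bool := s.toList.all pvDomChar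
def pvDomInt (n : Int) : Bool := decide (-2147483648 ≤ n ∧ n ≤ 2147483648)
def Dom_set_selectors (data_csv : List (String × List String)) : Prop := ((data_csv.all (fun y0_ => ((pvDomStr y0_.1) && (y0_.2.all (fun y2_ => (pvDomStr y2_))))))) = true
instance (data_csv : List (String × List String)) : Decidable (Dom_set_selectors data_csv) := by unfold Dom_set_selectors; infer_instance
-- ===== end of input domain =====

-- B replaces A's hash-based dedup (dict.fromkeys) plus copy and mapping passes by a
-- recursive filter-out dedup (nub: take head, filter equal elements from the tail,
-- recurse) feeding one comprehension; objective: alternative (equality only, no hashing).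

-- ===== PORT A =====
def set_selectors (data_csv : List (String × List String)) : List (List (String × String)) :=
  match (PySem.Dict.mk data_csv).get? "Country/Region" with
  | none => []   -- KeyError in Python: excluded by Pre_set_selectors
  | some rows =>
      let countries_all := rows.foldl (fun acc x => acc ++ [x]) ([] : List String)
      let countries_all2 := PySem.List.dedup countries_all
      countries_all2.foldl (fun acc x => acc ++ [[("label", x), ("value", x)]]) []

-- ===== PORT B =====
-- B's recursive helper uniq: keep the head, recurse on the tail with all copies of the head filtered out
def pvUniq : List String → List String
  | [] => []
  | x :: rest => x :: pvUniq (rest.filter (fun y => !(y == x)))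
termination_by l => l.length
decreasing_by
  have h : (List.filter (fun y => !((y : {z // z ∈ rest}) : String) == x) rest.attach).length ≤ rest.attach.length :=
    List.length_filter_le _ _
  simp at h ⊢
  omega

def set_selectors_alt (data_csv : List (String × List String)) : List (List (String × String)) :=
  match (PySem.Dict.mk data_csv).get? "Country/Region" with
  | none => []   -- KeyError in Python: excluded by Pre_set_selectors
  | some rows =>
      (pvUniq rows).map (fun x => [("label", x), ("value", x)])

-- ===== PRECONDITION & SPEC =====
-- A raises KeyError when the key 'Country/Region' is absent (B raises the same there);
-- Pre_ excludes exactly those inputs.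
def Pre_set_selectors (data_csv : List (String × List String)) : Prop :=
  "Country/Region" ∈ data_csv.map Prod.fst
instance (data_csv : List (String × List String)) : Decidable (Pre_set_selectors data_csv) := by unfold Pre_set_selectors; infer_instance
def pvWitness_set_selectors : (List (String × List String)) :=
  [("Country/Region", ["US", "FR", "US"])]

def Spec_set_selectors (data_csv : List (String × List String)) (out : List (List (String × String))) : Prop := out = set_selectors_alt data_csv
instance (data_csv : List (String × List String)) (out : List (List (String × String))) : Decidable (Spec_set_selectors data_csv out) := by unfold Spec_set_selectors; infer_instance

-- ===== CLAIM =====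
def Claim_equal_set_selectors : Prop := ∀ (data_csv : List (String × List String)), Dom_set_selectors data_csv → Pre_set_selectors data_csv → Spec_set_selectors data_csv (set_selectors data_csv)

-- ===== LEMMAS AND PROOFS =====

lemma pvUniq_nil : pvUniq [] = [] := by rw [pvUniq]

lemma pvUniq_cons (x : String) (rest : List String) :
    pvUniq (x :: rest) = x :: pvUniq (rest.filter (fun y => !(y == x))) := by
  rw [pvUniq]

-- A's copy loop is the identity
lemma pv_copy (rows : List String) :
    rows.foldl (fun acc x => acc ++ [x]) ([] : List String) = rows := by
  have h : ∀ (l acc : List String), l.foldl (fun acc x => acc ++ [x]) acc = acc ++ l := by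
    intro l
    induction l with
    | nil => simp
    | cons x l ih => intro acc; simp [List.foldl_cons, ih]
  simpa using h rows []

-- A's mapping loop is a map
lemma pv_mapfold {α β : Type} (f : α → List β) (l : List α) :
    l.foldl (fun acc x => acc ++ [f x]) [] = l.map f := by
  have h : ∀ (l : List α) (acc : List (List β)), l.foldl (fun acc x => acc ++ [f x]) acc = acc ++ l.map f := by
    intro l
    induction l with
    | nil => simp
    | cons x l ih => intro acc; simp [List.foldl_cons, ih]
  simpa using h l []

-- the seen-set fold of A's dedup, described by pvUniq on the not-yet-seen elements
lemma pv_foldl_add (l : List String) :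
    ∀ s : PySem.Set String,
      l.foldl PySem.Set.add s = s ++ pvUniq (l.filter (fun y => !(s.contains y))) := by
  induction l with
  | nil => intro s; simp [pvUniq_nil]
  | cons a l ih =>
      intro s
      by_cases hm : a ∈ s
      · have hadd : PySem.Set.add s a = s := by simp [PySem.Set.add, hm]
        have hstep : List.filter (fun y => !(PySem.Set.contains s y)) (a :: l)
            = List.filter (fun y => !(PySem.Set.contains s y)) l := by
          simp [hm]
        rw [List.foldl_cons, hadd, ih s, hstep]
      · have hadd : PySem.Set.add s a = s ++ [a] := by simp [PySem.Set.add, hm]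
        have hstep : List.filter (fun y => !(PySem.Set.contains s y)) (a :: l)
            = a :: List.filter (fun y => !(PySem.Set.contains s y)) l := by
          simp [hm]
        rw [List.foldl_cons, hadd, ih (s ++ [a]), hstep, pvUniq_cons, List.filter_filter]
        have hfil : List.filter (fun y => !(PySem.Set.contains (s ++ [a]) y)) l
            = List.filter (fun y => !(y == a) && !(PySem.Set.contains s y)) l := by
          apply List.filter_congr
          intro y _
          by_cases h2 : y = a <;> by_cases h1 : y ∈ s <;> simp [h1, h2]
        rw [hfil]
        simp

lemma pv_dedup_eq_uniq (rows : List String) : PySem.List.dedup rows = pvUniq rows := by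
  have h := pv_foldl_add rows []
  simp only [PySem.List.dedup, PySem.Set.ofList, PySem.Set.empty]
  rw [h]
  simp [PySem.Set.contains]

-- ===== VERDICT =====
theorem set_selectors_spec : Claim_equal_set_selectors := by
  intro data_csv _ _
  unfold Spec_set_selectors set_selectors set_selectors_alt
  cases h : (PySem.Dict.mk data_csv).get? "Country/Region" with
  | none => rfl
  | some rows =>
      simp only [pv_copy, pv_dedup_eq_uniq, pv_mapfold]
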